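-- pv_equiv track=rewrite | github.com/IamRoyNiu1307/leetcode | code1201/main.py | construct_account
-- ===== SOURCE A (Python) =====
-- import copy
--
-- def construct_account(num_list,replace_nums,index):
--     right_account=[]
--     for num in replace_nums:
--         account = copy.copy(num_list)
--         account[index]=num
--         if(calculate(account)):
--             right_account.append(account)
--     return right_account
--
-- def calculate(num_list):
--     sum = 0
--     for index,value in enumerate(num_list):
--         sum += (8-index+1)*value
--     return sum%11==0
-- ===== SOURCE B (Python) =====
-- def construct_account(num_list, replace_nums, index):
--     # Precompute the weighted checksum of num_list once; each candidate's
--     # checksum is then an O(1) incremental update instead of a full rescan.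
--     if not replace_nums:
--         return []
--     n = len(num_list)
--     j = index + n if index < 0 else index
--     old = num_list[j]
--     w = 9 - j
--     base = sum((9 - i) * v for i, v in enumerate(num_list))
--     prefix, suffix = num_list[:j], num_list[j + 1:]
--     return [prefix + [num] + suffix
--             for num in replace_nums
--             if (base + w * (num - old)) % 11 == 0]
-- ===== Notes on version B (the rewrite author's own statement) =====
-- stated objective: faster
-- what changed: B computes the weighted checksum of num_list once and updates it in O(1) per candidate (base + w*(num-old)), instead of copying the list and rescanning it for every replacement value.
import Mathlib
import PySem

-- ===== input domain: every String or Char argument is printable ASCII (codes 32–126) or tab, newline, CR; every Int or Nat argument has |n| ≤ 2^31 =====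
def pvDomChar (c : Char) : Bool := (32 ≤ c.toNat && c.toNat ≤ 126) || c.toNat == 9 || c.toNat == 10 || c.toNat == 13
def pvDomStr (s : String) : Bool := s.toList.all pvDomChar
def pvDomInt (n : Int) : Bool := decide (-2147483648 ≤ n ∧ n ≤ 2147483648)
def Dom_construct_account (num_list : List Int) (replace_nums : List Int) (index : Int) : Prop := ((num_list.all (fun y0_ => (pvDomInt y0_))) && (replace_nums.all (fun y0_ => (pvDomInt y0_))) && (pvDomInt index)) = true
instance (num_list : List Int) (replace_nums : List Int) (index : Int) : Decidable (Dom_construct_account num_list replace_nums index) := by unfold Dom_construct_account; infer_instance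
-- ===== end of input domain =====

-- B computes the weighted checksum once and updates it in O(1) per candidate instead of rescanning the list for each; equivalence of return values is proved on Pre_ (A raises outside it).


-- ===== PORT A =====
def calculate (num_list : List Int) : Bool :=
  PySem.Int.mod ((PySem.List.enumerate num_list 0).foldl
    (fun s p => s + (8 - p.1 + 1) * p.2) 0) 11 == 0

def construct_account (num_list : List Int) (replace_nums : List Int) (index : Int) : List (List Int) :=
  replace_nums.foldl (fun acc num =>
    match PySem.List.pySet? num_list index num with
    | some account => if calculate account then acc ++ [account] else acc
    | none => acc) []   -- none = IndexError in A; excluded by Pre_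

-- ===== PORT B =====
def construct_account_alt (num_list : List Int) (replace_nums : List Int) (index : Int) : List (List Int) :=
  if replace_nums = [] then []
  else
    let n : Int := num_list.length
    let j : Int := if index < 0 then index + n else index
    let old : Int := PySem.List.pyGetD num_list j 0   -- num_list[j]; in range under Pre_
    let w : Int := 9 - j
    let base : Int := ((PySem.List.enumerate num_list 0).map (fun p => (9 - p.1) * p.2)).sum
    let pre := PySem.List.slice num_list none (some j)
    let suf := PySem.List.slice num_list (some (j + 1)) none
    (replace_nums.filter (fun num => PySem.Int.mod (base + w * (num - old)) 11 == 0)).map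
      (fun num => pre ++ [num] ++ suf)

-- ===== PRECONDITION & SPEC =====
-- Pre_ excludes exactly the inputs on which A raises IndexError: a nonempty
-- replace_nums with index outside [-len(num_list), len(num_list)).
def Pre_construct_account (num_list : List Int) (replace_nums : List Int) (index : Int) : Prop :=
  replace_nums = [] ∨ PySem.Raise.InRange num_list.length index
instance (num_list : List Int) (replace_nums : List Int) (index : Int) : Decidable (Pre_construct_account num_list replace_nums index) := by unfold Pre_construct_account; infer_instance
def pvWitness_construct_account : List Int × List Int × Int := ([1, 2, 3], [4, 5, 6], 1)

def Spec_construct_account (num_list : List Int) (replace_nums : List Int) (index : Int) (out : List (List Int)) : Prop := out = construct_account_alt num_list replace_nums index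
instance (num_list : List Int) (replace_nums : List Int) (index : Int) (out : List (List Int)) : Decidable (Spec_construct_account num_list replace_nums index out) := by unfold Spec_construct_account; infer_instance

-- ===== CLAIM (what is proved, stated in full; the proofs are below) =====
def Claim_equal_construct_account : Prop := ∀ (num_list : List Int) (replace_nums : List Int) (index : Int), Dom_construct_account num_list replace_nums index → Pre_construct_account num_list replace_nums index → Spec_construct_account num_list replace_nums index (construct_account num_list replace_nums index)

-- ===== LEMMAS AND PROOFS =====

-- weighted sum of an updated list = weighted sum + weight * delta
lemma wsum_set (l : List Int) (s : Int) (k : Nat) (x : Int) (hk : k < l.length) :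
    ((PySem.List.enumerate (l.set k x) s).map (fun p => (9 - p.1) * p.2)).sum
      = ((PySem.List.enumerate l s).map (fun p => (9 - p.1) * p.2)).sum
        + (9 - (s + k)) * (x - l[k]) := by
  induction l generalizing s k with
  | nil => simp at hk
  | cons a t ih =>
    cases k with
    | zero => simp [PySem.List.enumerate_cons]; ring
    | succ k' =>
      simp only [List.set_cons_succ, PySem.List.enumerate_cons, List.map_cons, List.sum_cons]
      rw [ih (s + 1) k' (by simpa using hk)]
      simp; ring

-- A's foldl checksum as a sum (8 - i + 1 = 9 - i)
lemma wfold (m : List Int) (s c : Int) :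
    (PySem.List.enumerate m s).foldl (fun a p => a + (8 - p.1 + 1) * p.2) c
      = c + ((PySem.List.enumerate m s).map (fun p => (9 - p.1) * p.2)).sum := by
  induction m generalizing s c with
  | nil => simp
  | cons a t ih =>
    simp only [PySem.List.enumerate_cons, List.foldl_cons, List.map_cons, List.sum_cons]
    rw [ih]; ring

lemma calculate_set (l : List Int) (k : Nat) (x : Int) (hk : k < l.length) :
    calculate (l.set k x)
      = (PySem.Int.mod ((((PySem.List.enumerate l 0).map (fun p => (9 - p.1) * p.2)).sum)
          + (9 - (k : Int)) * (x - l[k])) 11 == 0) := by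
  unfold calculate
  rw [wfold, wsum_set l 0 k x hk]
  simp

theorem construct_account_spec : Claim_equal_construct_account := by
  intro num_list replace_nums index _ hpre
  unfold Spec_construct_account construct_account construct_account_alt
  rcases hpre with h | h
  · subst h; simp
  · rcases eq_or_ne replace_nums [] with he | he
    · subst he; simp
    · simp only [if_neg he]
      have hlen : 0 < num_list.length := by
        rcases h with ⟨h1, h2⟩ <;> omega
      set j : Int := if index < 0 then index + (num_list.length : Int) else index with hj
      have hj0 : 0 ≤ j ∧ j < (num_list.length : Int) := by
        rcases h with ⟨h1, h2⟩
        by_cases hneg : index < 0 <;> simp [hj, hneg] <;> omega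
      set k : Nat := j.toNat with hk
      have hkl : k < num_list.length := by omega
      have hjk : j = (k : Int) := by omega
      -- pySet? returns the updated list
      have hset : ∀ x : Int, PySem.List.pySet? num_list index x = some (num_list.set k x) := by
        intro x
        rcases h with ⟨h1, h2⟩
        by_cases hneg : index < 0
        · simp only [PySem.List.pySet?, PySem.List.pyIdx?]
          have : ¬ (0 ≤ index) := by omega
          simp [this]
          constructor
          · omega
          · congr 1; simp [hk, hj, hneg]; omega
        · have : index = (k : Int) := by simp [hk, hj, hneg]; omega
          rw [this]; exact PySem.List.pySet?_natCast num_list k x hkl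
      -- fold A into filter+map form
      have hA : replace_nums.foldl (fun acc num =>
          match PySem.List.pySet? num_list index num with
          | some account => if calculate account then acc ++ [account] else acc
          | none => acc) ([] : List (List Int))
        = replace_nums.foldl (fun acc num =>
            if calculate (num_list.set k num) then acc ++ [num_list.set k num] else acc) [] := by
        apply PySem.List.foldl_congr_mem
        intro acc num _; rw [hset num]
      rw [hA, PySem.List.foldl_append_if (fun num => calculate (num_list.set k num))
            (fun num => num_list.set k num)]
      simp only [List.nil_append]
      have hget : PySem.List.pyGetD num_list j 0 = num_list[k]'hkl := by
        rw [hjk, PySem.List.pyGetD_natCast]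
        exact List.getD_eq_getElem num_list 0 hkl
      -- same filter predicate
      have hfil : (fun num => calculate (num_list.set k num))
          = (fun num => PySem.Int.mod
              ((((PySem.List.enumerate num_list 0).map (fun p => (9 - p.1) * p.2)).sum)
                + (9 - j) * (num - PySem.List.pyGetD num_list j 0)) 11 == 0) := by
        funext num
        rw [calculate_set num_list k num hkl, hget, hjk]
      rw [hfil]
      -- same element builder
      apply List.map_congr_left
      intro num _
      have hslice1 : PySem.List.slice num_list none (some j) = num_list.take k := by
        rw [hjk, PySem.List.slice_to_natCast]
      have hslice2 : PySem.List.slice num_list (some (j + 1)) none = num_list.drop (k + 1) := by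
        have hj1 : j + 1 = ((k + 1 : Nat) : Int) := by push_cast; omega
        rw [hj1, PySem.List.slice_from_natCast]
      rw [hslice1, hslice2]
      rw [List.set_eq_take_append_cons_drop, if_pos hkl]
      simp
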